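-- pv_equiv track=rewrite | github.com/redknightlois/dbg | examples/scenarios/11-lru-corruption-py/broken.py | reference_result
-- ===== SOURCE A (Python) =====
-- def reference_result(ops: list[tuple[str, int, int]], cap: int) -> dict[int, int]:
--     """A trusted reference using OrderedDict — what we expect the
--     cache contents to be after running the workload."""
--     from collections import OrderedDict
--     od: OrderedDict[int, int] = OrderedDict()
--     for op, k, v in ops:
--         if op == "put":
--             if k in od:
--                 od.move_to_end(k, last=False)
--                 od[k] = v
--             else:
--                 if len(od) >= cap:
--                     od.popitem(last=True)  # evict LRU = back of OrderedDict
--                 od[k] = v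
--                 od.move_to_end(k, last=False)
--         else:  # get
--             if k in od:
--                 od.move_to_end(k, last=False)
--     return dict(od)
-- ===== SOURCE B (Python) =====
-- def reference_result(ops: list[tuple[str, int, int]], cap: int) -> dict[int, int]:
--     """LRU replay without any recency structure: each key carries the timestamp
--     of its last use; eviction removes the min-timestamp key and the final
--     MRU-first order is recovered by sorting timestamps descending."""
--     state: dict[int, tuple[int, int]] = {}  # key -> (last_use_time, value)
--     for t, (op, k, v) in enumerate(ops):
--         if op == "put":
--             if k in state:
--                 state[k] = (t, v)
--             else:
--                 if len(state) >= cap: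
--                     lru = min(state, key=lambda x: state[x][0])
--                     del state[lru]
--                 state[k] = (t, v)
--         else:  # get
--             if k in state:
--                 state[k] = (t, state[k][1])
--     order = sorted(state, key=lambda x: state[x][0], reverse=True)
--     return {k: state[k][1] for k in order}
-- ===== Notes on version B (the rewrite author's own statement) =====
-- stated objective: alternative
-- what changed: A maintains the recency order explicitly in an OrderedDict with move_to_end/popitem; B keeps no order at all, stamping each key with its last-use time, evicting by a min-timestamp scan, and recovering the final MRU-first order once at the end by sorting timestamps descending.
import Mathlib
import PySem

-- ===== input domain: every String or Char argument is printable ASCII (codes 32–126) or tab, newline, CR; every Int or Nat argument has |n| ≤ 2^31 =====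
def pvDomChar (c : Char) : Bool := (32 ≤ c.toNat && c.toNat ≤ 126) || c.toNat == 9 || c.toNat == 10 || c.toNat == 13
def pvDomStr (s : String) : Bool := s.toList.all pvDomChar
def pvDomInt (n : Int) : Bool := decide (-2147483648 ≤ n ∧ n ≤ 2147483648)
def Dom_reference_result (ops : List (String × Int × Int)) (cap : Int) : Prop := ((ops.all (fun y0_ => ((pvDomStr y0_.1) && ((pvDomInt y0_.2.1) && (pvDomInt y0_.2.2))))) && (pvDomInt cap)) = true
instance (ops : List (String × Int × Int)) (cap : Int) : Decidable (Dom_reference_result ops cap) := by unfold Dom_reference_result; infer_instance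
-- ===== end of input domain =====

-- B replaces A's explicitly maintained OrderedDict recency order with per-key last-use timestamps: eviction is a min-timestamp scan and the final order is one sort at the end (alternative algorithm, same cost class).


-- ===== PORT A =====
-- The OrderedDict od is carried as its (key, value) items in order, front = most recent; keys stay unique.

-- od.move_to_end(k, last=False): move the (unique) entry with key k to the front.
def pvOdMoveFront (od : List (Int × Int)) (k : Int) : List (Int × Int) :=
  match od.find? (fun p => p.1 == k) with
  | some e => e :: od.filter (fun p => !(p.1 == k))
  | none => od

-- od[k] = v on a key already present: overwrite the value in place.
def pvOdSet (od : List (Int × Int)) (k : Int) (v : Int) : List (Int × Int) :=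
  od.map (fun p => if p.1 == k then (k, v) else p)

def pvStepA (cap : Int) (od : List (Int × Int)) (t : String × Int × Int) : List (Int × Int) :=
  if t.1 == "put" then
    if od.any (fun p => p.1 == t.2.1) then
      pvOdSet (pvOdMoveFront od t.2.1) t.2.1 t.2.2
    else
      -- od.popitem(last=True); on an empty od Python raises KeyError (excluded by Pre_)
      let od1 := if cap ≤ (od.length : Int) then od.dropLast else od
      -- od[k] = v on a fresh key appends; then move_to_end(k, last=False)
      pvOdMoveFront (od1 ++ [(t.2.1, t.2.2)]) t.2.1
  else
    if od.any (fun p => p.1 == t.2.1) then pvOdMoveFront od t.2.1 else od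

-- dict(od) keeps od's order, and od's keys are already unique
def reference_result (ops : List (String × Int × Int)) (cap : Int) : List (Int × Int) :=
  ops.foldl (pvStepA cap) []

-- ===== PORT B =====
-- State: a single dict key → (last_use_time, value); t is enumerate's counter.

def pvStepB (cap : Int) (st : PySem.Dict Int (Int × Int)) (tok : Int × (String × Int × Int)) :
    PySem.Dict Int (Int × Int) :=
  let t := tok.1
  let k := tok.2.2.1
  if tok.2.1 == "put" then
    if st.contains k then st.insert k (t, tok.2.2.2)
    else
      let st1 :=
        if cap ≤ (st.size : Int) then
          match PySem.List.min? st.keys (fun x => (st.getD x (0, 0)).1) with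
          | some lru => st.erase lru   -- lru = min(state, key=…); del state[lru]
          | none => st                 -- min() of an empty dict raises ValueError in Python (excluded by Pre_)
        else st
      st1.insert k (t, tok.2.2.2)
  else
    if st.contains k then st.insert k (t, (st.getD k (0, 0)).2) else st

-- order = sorted(state, key=…, reverse=True); {k: state[k][1] for k in order}
def reference_result_alt (ops : List (String × Int × Int)) (cap : Int) : List (Int × Int) :=
  let st := (PySem.List.enumerate ops 0).foldl (pvStepB cap) PySem.Dict.empty
  (PySem.List.sorted st.keys (fun x => (st.getD x (0, 0)).1) true).map
    (fun k => (k, (st.getD k (0, 0)).2))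

-- ===== PRECONDITION & SPEC =====
-- Pre_ excludes only the inputs where A raises: with cap ≤ 0, the first "put" evicts from an
-- empty OrderedDict and popitem raises KeyError (B's min() over the empty dict raises ValueError there too).
def Pre_reference_result (ops : List (String × Int × Int)) (cap : Int) : Prop :=
  1 ≤ cap ∨ ∀ t ∈ ops, t.1 ≠ "put"
instance (ops : List (String × Int × Int)) (cap : Int) : Decidable (Pre_reference_result ops cap) := by
  unfold Pre_reference_result; infer_instance

def pvWitness_reference_result : (List (String × Int × Int)) × Int :=
  ([("put", 1, 10), ("put", 2, 20), ("get", 1, 0), ("put", 3, 30)], 2)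

def Spec_reference_result (ops : List (String × Int × Int)) (cap : Int) (out : List (Int × Int)) : Prop := out = reference_result_alt ops cap
instance (ops : List (String × Int × Int)) (cap : Int) (out : List (Int × Int)) : Decidable (Spec_reference_result ops cap out) := by unfold Spec_reference_result; infer_instance

-- ===== CLAIM (what is proved, stated in full; the proofs are below) =====
def Claim_equal_reference_result : Prop := ∀ (ops : List (String × Int × Int)) (cap : Int), Dom_reference_result ops cap → Pre_reference_result ops cap → Spec_reference_result ops cap (reference_result ops cap)

-- ===== LEMMAS AND PROOFS =====

-- the last-use timestamp B stores for key k
def pvTs (st : PySem.Dict Int (Int × Int)) (k : Int) : Int := (st.getD k (0, 0)).1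

-- The coupling invariant between A's OrderedDict items od and B's timestamped dict st at time t:
-- same keys, same values, od ordered by strictly decreasing timestamps, all timestamps < t.
def pvInv (od : List (Int × Int)) (st : PySem.Dict Int (Int × Int)) (t : Int) : Prop :=
  st.keys.Nodup ∧
  (od.map Prod.fst).Perm st.keys ∧
  (∀ p ∈ od, (st.getD p.1 (0, 0)).2 = p.2) ∧
  od.Pairwise (fun p q => pvTs st q.1 < pvTs st p.1) ∧
  (∀ k ∈ st.keys, pvTs st k < t)

theorem pvMap_self {α : Type} (l : List α) (f : α → α) (h : ∀ x ∈ l, f x = x) :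
    l.map f = l := by
  induction l with
  | nil => rfl
  | cons x rest ih =>
    simp only [List.map_cons, h x (by simp), ih (fun y hy => h y (by simp [hy]))]

theorem pvFind_filter_ne {ν : Type} (xs : List (Int × ν)) (k l : Int) (h : l ≠ k) :
    (xs.filter (fun p => !(p.1 == k))).find? (fun p => p.1 == l)
      = xs.find? (fun p => p.1 == l) := by
  induction xs with
  | nil => rfl
  | cons p rest ih =>
    by_cases hp : p.1 = k
    · have hkl : (k == l) = false := by simp; omega
      simp [hp, hkl, ih]
    · by_cases hl : p.1 = l <;> simp [hp, hl, h, ih]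

theorem pvDict_getD_erase_of_ne (d : PySem.Dict Int (Int × Int)) (k l : Int) (h : l ≠ k) :
    (d.erase k).getD l (0, 0) = d.getD l (0, 0) := by
  simp only [PySem.Dict.getD, PySem.Dict.get?, PySem.Dict.erase]
  rw [pvFind_filter_ne d.items k l h]

theorem pvKeys_erase (d : PySem.Dict Int (Int × Int)) (k : Int) :
    (d.erase k).keys = d.keys.filter (fun x => !(x == k)) := by
  simp only [PySem.Dict.keys, PySem.Dict.erase, List.filter_map]
  rfl

theorem pvKeys_length_size (d : PySem.Dict Int (Int × Int)) : d.keys.length = d.size := by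
  simp [PySem.Dict.keys, PySem.Dict.size]

theorem pvMapFst_filter (od : List (Int × Int)) (k : Int) :
    (od.filter (fun p => !(p.1 == k))).map Prod.fst
      = (od.map Prod.fst).filter (fun x => !(x == k)) := by
  rw [List.filter_map]; rfl

theorem pvMoveFront_cons (od : List (Int × Int)) (k : Int) (e : Int × Int)
    (hf : od.find? (fun p => p.1 == k) = some e) :
    pvOdMoveFront od k = e :: od.filter (fun p => !(p.1 == k)) := by
  unfold pvOdMoveFront
  rw [hf]

theorem pvMoveFront_append (xs : List (Int × Int)) (k v : Int) (h : ∀ p ∈ xs, p.1 ≠ k) :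
    pvOdMoveFront (xs ++ [(k, v)]) k = (k, v) :: xs := by
  unfold pvOdMoveFront
  rw [List.find?_append]
  have h1 : xs.find? (fun p => p.1 == k) = none := by
    apply List.find?_eq_none.mpr; intro p hp; simp [h p hp]
  rw [h1]
  simp only [Option.none_or, List.find?_cons]
  rw [List.filter_append]
  have h2 : xs.filter (fun p => !(p.1 == k)) = xs := by
    apply List.filter_eq_self.mpr; intro p hp; simp [h p hp]
  simp [h2]

-- touching key k (present in the cache) at time t with new stored value w:
-- A fronts the entry, B restamps it; the invariant carries over.
theorem pvTouch (od : List (Int × Int)) (st : PySem.Dict Int (Int × Int)) (t k w : Int)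
    (hinv : pvInv od st t) (hk : k ∈ st.keys) :
    pvInv ((k, w) :: od.filter (fun p => !(p.1 == k))) (st.insert k (t, w)) (t + 1) := by
  obtain ⟨hnd, hperm, hval, hpw, hbnd⟩ := hinv
  have hkod : k ∈ od.map Prod.fst := hperm.mem_iff.mpr hk
  have hcont : st.contains k = true := (PySem.Dict.contains_iff_mem_keys _ _).mpr hk
  have hkeys : (st.insert k (t, w)).keys = st.keys := PySem.Dict.keys_insert_of_contains st _ hcont
  have hndod : (od.map Prod.fst).Nodup := hperm.nodup_iff.mpr hnd
  have htail_mem : ∀ p ∈ od.filter (fun p => !(p.1 == k)), p ∈ od ∧ p.1 ≠ k := by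
    intro p hp
    have h1 := List.of_mem_filter hp
    exact ⟨List.mem_of_mem_filter hp, by simpa using h1⟩
  have hgd_ne : ∀ (j : Int), j ≠ k → (st.insert k (t, w)).getD j (0, 0) = st.getD j (0, 0) :=
    fun j hj => PySem.Dict.getD_insert_of_ne _ _ _ hj
  refine ⟨hkeys ▸ hnd, ?_, ?_, ?_, ?_⟩
  · rw [hkeys]
    simp only [List.map_cons, pvMapFst_filter]
    have he : (od.map Prod.fst).filter (fun x => !(x == k)) = (od.map Prod.fst).erase k := by
      rw [List.Nodup.erase_eq_filter hndod]; rfl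
    rw [he]
    exact ((List.perm_cons_erase hkod).symm).trans hperm
  · intro p hp
    rcases List.mem_cons.mp hp with rfl | hp
    · simp [PySem.Dict.getD_insert_self]
    · obtain ⟨hpo, hpk⟩ := htail_mem p hp
      rw [hgd_ne _ hpk]
      exact hval p hpo
  · refine List.pairwise_cons.mpr ⟨?_, ?_⟩
    · intro q hq
      obtain ⟨hqo, hqk⟩ := htail_mem q hq
      have hq1 : q.1 ∈ st.keys := hperm.mem_iff.mp (List.mem_map_of_mem hqo)
      simp only [pvTs, hgd_ne _ hqk, PySem.Dict.getD_insert_self]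
      exact hbnd _ hq1
    · have hpw' := hpw.filter (fun p => !(p.1 == k))
      refine List.Pairwise.imp_of_mem ?_ hpw'
      intro a b ha hb hab
      obtain ⟨_, hak⟩ := htail_mem a ha
      obtain ⟨_, hbk⟩ := htail_mem b hb
      simpa only [pvTs, hgd_ne _ hak, hgd_ne _ hbk] using hab
  · intro j hj
    rw [hkeys] at hj
    by_cases hjk : j = k
    · subst hjk; simp only [pvTs, PySem.Dict.getD_insert_self]; omega
    · simp only [pvTs, hgd_ne _ hjk]
      have := hbnd _ hj
      simp only [pvTs] at this
      omega

theorem pvStep_inv (cap : Int) (od : List (Int × Int)) (st : PySem.Dict Int (Int × Int))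
    (t : Int) (tok : String × Int × Int) (hinv : pvInv od st t)
    (hpre : 1 ≤ cap ∨ tok.1 ≠ "put") :
    pvInv (pvStepA cap od tok) (pvStepB cap st (t, tok)) (t + 1) := by
  obtain ⟨op, k, v⟩ := tok
  have hcopy := hinv
  obtain ⟨hnd, hperm, hval, hpw, hbnd⟩ := hcopy
  have hndod : (od.map Prod.fst).Nodup := hperm.nodup_iff.mpr hnd
  have hAny : (od.any (fun p => p.1 == k)) = st.contains k := by
    by_cases hm : k ∈ st.keys
    · have : k ∈ od.map Prod.fst := hperm.mem_iff.mpr hm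
      obtain ⟨p, hpo, hpk⟩ := List.mem_map.mp this
      rw [(PySem.Dict.contains_iff_mem_keys _ _).mpr hm]
      exact List.any_eq_true.mpr ⟨p, hpo, by simp [hpk]⟩
    · have h1 : st.contains k = false := by
        cases h : st.contains k
        · rfl
        · exact absurd ((PySem.Dict.contains_iff_mem_keys _ _).mp h) hm
      have h2 : (od.any (fun p => p.1 == k)) = false := by
        rw [List.any_eq_false]
        intro p hpo
        simp only [beq_iff_eq]
        intro hpk
        exact hm (hperm.mem_iff.mp (hpk ▸ List.mem_map_of_mem hpo))
      rw [h1, h2]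
  simp only [pvStepA, pvStepB, hAny]
  by_cases hop : (op == "put") = true
  · simp only [hop, if_true]
    by_cases hm : k ∈ st.keys
    · -- put on an existing key
      have hcont : st.contains k = true := (PySem.Dict.contains_iff_mem_keys _ _).mpr hm
      simp only [hcont, if_true]
      obtain ⟨e, hf⟩ : ∃ e, od.find? (fun p => p.1 == k) = some e := by
        have : k ∈ od.map Prod.fst := hperm.mem_iff.mpr hm
        obtain ⟨p, hpo, hpk⟩ := List.mem_map.mp this
        have : (od.find? (fun p => p.1 == k)).isSome := by
          rw [List.find?_isSome]
          exact ⟨p, hpo, by simp [hpk]⟩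
        exact Option.isSome_iff_exists.mp this
      have hek : e.1 = k := by simpa using List.find?_some hf
      rw [pvMoveFront_cons od k e hf]
      have hset : pvOdSet (e :: od.filter (fun p => !(p.1 == k))) k v
          = (k, v) :: od.filter (fun p => !(p.1 == k)) := by
        unfold pvOdSet
        simp only [List.map_cons, hek, BEq.rfl, if_true]
        congr 1
        apply pvMap_self
        intro p hp
        have := List.of_mem_filter hp
        simp only [Bool.not_eq_true'] at this
        simp [this]
      rw [hset]
      exact pvTouch od st t k v hinv hm
    · -- put on a fresh key
      have hcont : st.contains k = false := by
        cases h : st.contains k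
        · rfl
        · exact absurd ((PySem.Dict.contains_iff_mem_keys _ _).mp h) hm
      simp only [hcont, Bool.false_eq_true, if_false]
      have hknod : k ∉ od.map Prod.fst := fun h => hm (hperm.mem_iff.mp h)
      have hfst_ne : ∀ p ∈ od, p.1 ≠ k := by
        intro p hpo hpk
        exact hknod (hpk ▸ List.mem_map_of_mem hpo)
      have hlen : (od.length : Int) = (st.size : Int) := by
        rw [← pvKeys_length_size, ← hperm.length_eq, List.length_map]
      have hgd_ins : ∀ (j : Int), j ≠ k →
          (st.insert k (t, v)).getD j (0, 0) = st.getD j (0, 0) :=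
        fun j hj => PySem.Dict.getD_insert_of_ne _ _ _ hj
      by_cases hcap : cap ≤ (od.length : Int)
      · -- eviction
        have hcap' : cap ≤ (st.size : Int) := hlen ▸ hcap
        have hcap1 : 1 ≤ cap := by
          rcases hpre with h | h
          · exact h
          · exact absurd (by simpa using hop) h
        have hne : od ≠ [] := by
          intro h; subst h; simp at hcap; omega
        have hkeys_ne : st.keys ≠ [] := by
          intro h
          have := hperm.length_eq
          rw [h] at this
          simp at this
          exact hne (List.eq_nil_of_length_eq_zero (by simpa using this))
        obtain ⟨m, hmin⟩ : ∃ m, PySem.List.min? st.keys (fun x => pvTs st x) = some m := by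
          cases h : PySem.List.min? st.keys (fun x => pvTs st x) with
          | none => exact absurd ((PySem.List.min?_eq_none_iff _ _).mp h) hkeys_ne
          | some m => exact ⟨m, rfl⟩
        have hmem := PySem.List.min?_mem hmin
        have hmin' := PySem.List.min?_isMin hmin
        -- identify the evicted key with the last entry of od
        set lst := od.getLast hne with hlst
        have hsplit : od.dropLast ++ [lst] = od := List.dropLast_append_getLast hne
        have hlstmem : lst ∈ od := List.getLast_mem hne
        have hlk : lst.1 ∈ st.keys := hperm.mem_iff.mp (List.mem_map_of_mem hlstmem)
        have hlt : ∀ p ∈ od.dropLast, pvTs st lst.1 < pvTs st p.1 := by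
          have := hsplit ▸ hpw
          have h2 := (List.pairwise_append.mp this).2.2
          intro p hp
          exact h2 p hp lst (by simp)
        have hmlst : m = lst.1 := by
          have : m ∈ od.map Prod.fst := hperm.mem_iff.mpr hmem
          obtain ⟨p, hpo, hpk⟩ := List.mem_map.mp this
          rw [← hsplit] at hpo
          rcases List.mem_append.mp hpo with hp | hp
          · exfalso
            have h1 := hlt p hp
            have h2 := hmin' _ hlk
            rw [hpk] at h1
            omega
          · simp at hp
            rw [← hpk, hp]
        -- nodup of od's keys split at the last entry
        have hnd_split : (od.dropLast.map Prod.fst ++ [lst.1]).Nodup := by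
          have : od.map Prod.fst = od.dropLast.map Prod.fst ++ [lst.1] := by
            rw [← hsplit]; simp
          exact this ▸ hndod
        have hlast_notin : lst.1 ∉ od.dropLast.map Prod.fst := by
          have := (List.nodup_append.mp hnd_split).2.2
          intro hmem'
          exact this lst.1 hmem' lst.1 (by simp) rfl
        have hdrop_sub : ∀ p ∈ od.dropLast, p ∈ od := fun p hp => (List.dropLast_sublist od).mem hp
        have hdrop_ne_k : ∀ p ∈ od.dropLast, p.1 ≠ k := fun p hp => hfst_ne p (hdrop_sub p hp)
        have hdrop_ne_m : ∀ p ∈ od.dropLast, p.1 ≠ lst.1 := by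
          intro p hp h
          exact hlast_notin (h ▸ List.mem_map_of_mem hp)
        -- both sides take their eviction branch
        rw [if_pos hcap, if_pos hcap']
        have hts : (fun x => (st.getD x (0, 0)).1) = (fun x => pvTs st x) := rfl
        rw [hts, hmin]
        rw [pvMoveFront_append _ k v hdrop_ne_k]
        -- getD through erase-then-insert for keys other than k and m
        have hgd : ∀ (j : Int), j ≠ k → j ≠ lst.1 →
            (((st.erase m).insert k (t, v)).getD j (0, 0)) = st.getD j (0, 0) := by
          intro j hjk hjm
          rw [PySem.Dict.getD_insert_of_ne _ _ _ hjk, hmlst, pvDict_getD_erase_of_ne _ _ _ hjm]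
        have hkeys_er : (st.erase m).keys = st.keys.filter (fun x => !(x == lst.1)) := by
          rw [pvKeys_erase, hmlst]
        have hcont_er : (st.erase m).contains k = false := by
          cases h : (st.erase m).contains k
          · rfl
          · exfalso
            have := (PySem.Dict.contains_iff_mem_keys _ _).mp h
            rw [hkeys_er] at this
            exact hm (List.mem_of_mem_filter this)
        have hkeys' : ((st.erase m).insert k (t, v)).keys
            = st.keys.filter (fun x => !(x == lst.1)) ++ [k] := by
          rw [PySem.Dict.keys_insert_of_not_contains (st.erase m) _ hcont_er, hkeys_er]
        have hperm_drop : (od.dropLast.map Prod.fst).Perm (st.keys.filter (fun x => !(x == lst.1))) := by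
          have h1 := hperm.filter (fun x => !(x == lst.1))
          have h2 : (od.map Prod.fst).filter (fun x => !(x == lst.1)) = od.dropLast.map Prod.fst := by
            have h3 : od.map Prod.fst = od.dropLast.map Prod.fst ++ [lst.1] := by
              rw [← hsplit]; simp
            rw [h3, List.filter_append]
            have h4 : (od.dropLast.map Prod.fst).filter (fun x => !(x == lst.1))
                = od.dropLast.map Prod.fst := by
              apply List.filter_eq_self.mpr
              intro x hx
              simp only [Bool.not_eq_eq_eq_not, Bool.not_true, beq_eq_false_iff_ne, ne_eq]
              intro h
              exact hlast_notin (h ▸ hx)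
            rw [h4]
            simp
          exact h2 ▸ h1
        refine ⟨?_, ?_, ?_, ?_, ?_⟩
        · rw [hkeys']
          refine List.Nodup.append (hnd.filter _) (by simp) ?_
          intro x hx hx2
          simp at hx2
          subst hx2
          exact hm (List.mem_of_mem_filter hx)
        · rw [hkeys']
          simp only [List.map_cons]
          exact ((List.perm_append_singleton k _).symm).trans (hperm_drop.append_right [k])
        · intro p hp
          rcases List.mem_cons.mp hp with rfl | hp
          · simp [PySem.Dict.getD_insert_self]
          · rw [hgd _ (hdrop_ne_k p hp) (hdrop_ne_m p hp)]
            exact hval p (hdrop_sub p hp)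
        · refine List.pairwise_cons.mpr ⟨?_, ?_⟩
          · intro q hq
            have hq1 : q.1 ∈ st.keys := hperm.mem_iff.mp (List.mem_map_of_mem (hdrop_sub q hq))
            simp only [pvTs, hgd _ (hdrop_ne_k q hq) (hdrop_ne_m q hq), PySem.Dict.getD_insert_self]
            exact hbnd _ hq1
          · have hpw' : od.dropLast.Pairwise (fun p q => pvTs st q.1 < pvTs st p.1) :=
              List.Pairwise.sublist (List.dropLast_sublist od) hpw
            refine List.Pairwise.imp_of_mem ?_ hpw'
            intro a b ha hb hab
            simpa only [pvTs, hgd _ (hdrop_ne_k a ha) (hdrop_ne_m a ha),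
              hgd _ (hdrop_ne_k b hb) (hdrop_ne_m b hb)] using hab
        · intro j hj
          rw [hkeys'] at hj
          rcases List.mem_append.mp hj with hj | hj
          · have hj1 : j ∈ st.keys := List.mem_of_mem_filter hj
            have hj2 : j ≠ lst.1 := by
              have := List.of_mem_filter hj
              simpa using this
            have hjk : j ≠ k := fun h => hm (h ▸ hj1)
            simp only [pvTs, hgd _ hjk hj2]
            have := hbnd _ hj1
            simp only [pvTs] at this
            omega
          · simp at hj
            subst hj
            simp only [pvTs, PySem.Dict.getD_insert_self]
            omega
      · -- no eviction
        have hcap' : ¬ cap ≤ (st.size : Int) := hlen ▸ hcap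
        rw [if_neg hcap, if_neg hcap']
        rw [pvMoveFront_append _ k v hfst_ne]
        have hkeys' : (st.insert k (t, v)).keys = st.keys ++ [k] :=
          PySem.Dict.keys_insert_of_not_contains st _ hcont
        refine ⟨?_, ?_, ?_, ?_, ?_⟩
        · rw [hkeys']
          refine List.Nodup.append hnd (by simp) ?_
          intro x hx hx2
          simp at hx2
          subst hx2
          exact hm hx
        · rw [hkeys']
          simp only [List.map_cons]
          exact ((List.perm_append_singleton k _).symm).trans (hperm.append_right [k])
        · intro p hp
          rcases List.mem_cons.mp hp with rfl | hp
          · simp [PySem.Dict.getD_insert_self]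
          · rw [hgd_ins _ (hfst_ne p hp)]
            exact hval p hp
        · refine List.pairwise_cons.mpr ⟨?_, ?_⟩
          · intro q hq
            have hq1 : q.1 ∈ st.keys := hperm.mem_iff.mp (List.mem_map_of_mem hq)
            simp only [pvTs, hgd_ins _ (hfst_ne q hq), PySem.Dict.getD_insert_self]
            exact hbnd _ hq1
          · refine List.Pairwise.imp_of_mem ?_ hpw
            intro a b ha hb hab
            simpa only [pvTs, hgd_ins _ (hfst_ne a ha), hgd_ins _ (hfst_ne b hb)] using hab
        · intro j hj
          rw [hkeys'] at hj
          rcases List.mem_append.mp hj with hj | hj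
          · have hjk : j ≠ k := fun h => hm (h ▸ hj)
            simp only [pvTs, hgd_ins _ hjk]
            have := hbnd _ hj
            simp only [pvTs] at this
            omega
          · simp at hj
            subst hj
            simp only [pvTs, PySem.Dict.getD_insert_self]
            omega
  · -- get
    simp only [Bool.not_eq_true] at hop
    simp only [hop, Bool.false_eq_true, if_false]
    by_cases hm : k ∈ st.keys
    · have hcont : st.contains k = true := (PySem.Dict.contains_iff_mem_keys _ _).mpr hm
      simp only [hcont, if_true]
      obtain ⟨e, hf⟩ : ∃ e, od.find? (fun p => p.1 == k) = some e := by
        have : k ∈ od.map Prod.fst := hperm.mem_iff.mpr hm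
        obtain ⟨p, hpo, hpk⟩ := List.mem_map.mp this
        have : (od.find? (fun p => p.1 == k)).isSome := by
          rw [List.find?_isSome]
          exact ⟨p, hpo, by simp [hpk]⟩
        exact Option.isSome_iff_exists.mp this
      have hek : e.1 = k := by simpa using List.find?_some hf
      have hemem : e ∈ od := List.mem_of_find?_eq_some hf
      have hev : (st.getD k (0, 0)).2 = e.2 := by
        rw [← hek]
        exact hval e hemem
      rw [pvMoveFront_cons od k e hf, hev]
      have he : e = (k, e.2) := by
        cases e; simp_all
      rw [he] at *
      exact pvTouch od st t k e.2 hinv hm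
    · have hcont : st.contains k = false := by
        cases h : st.contains k
        · rfl
        · exact absurd ((PySem.Dict.contains_iff_mem_keys _ _).mp h) hm
      simp only [hcont, Bool.false_eq_true, if_false]
      exact ⟨hnd, hperm, hval, hpw, fun j hj => by have := hbnd _ hj; omega⟩

theorem pvFold_inv (cap : Int) (ops : List (String × Int × Int)) (od : List (Int × Int))
    (st : PySem.Dict Int (Int × Int)) (t : Int) (hinv : pvInv od st t)
    (hpre : 1 ≤ cap ∨ ∀ u ∈ ops, u.1 ≠ "put") :
    pvInv (ops.foldl (pvStepA cap) od)
      ((PySem.List.enumerate ops t).foldl (pvStepB cap) st) (t + ops.length) := by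
  induction ops generalizing od st t with
  | nil => simpa [PySem.List.enumerate_nil] using hinv
  | cons u rest ih =>
    rw [PySem.List.enumerate_cons]
    simp only [List.foldl_cons]
    have h1 : 1 ≤ cap ∨ u.1 ≠ "put" := by
      rcases hpre with h | h
      · exact Or.inl h
      · exact Or.inr (h u (by simp))
    have h2 : 1 ≤ cap ∨ ∀ w ∈ rest, w.1 ≠ "put" := by
      rcases hpre with h | h
      · exact Or.inl h
      · exact Or.inr fun w hw => h w (by simp [hw])
    have hstep := pvStep_inv cap od st t u hinv h1
    have := ih _ _ _ hstep h2
    have harith : (t + 1) + (rest.length : Int) = t + ((u :: rest).length : Int) := by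
      simp; omega
    rw [harith] at this
    exact this


-- ===== VERDICT (by name: the statement is the Claim_ definition above) =====
theorem reference_result_spec : Claim_equal_reference_result := by
  intro ops cap _ hpre
  unfold Spec_reference_result reference_result reference_result_alt
  have hinv0 : pvInv [] PySem.Dict.empty 0 := by
    refine ⟨?_, by simp, by simp, by simp, ?_⟩
    · simp [PySem.Dict.keys_empty]
    · intro k hk
      simp [PySem.Dict.keys_empty] at hk
  have h := pvFold_inv cap ops [] PySem.Dict.empty 0 hinv0 hpre
  obtain ⟨hnd, hperm, hval, hpw, _⟩ := h
  set st := (PySem.List.enumerate ops 0).foldl (pvStepB cap) PySem.Dict.empty with hst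
  set od := ops.foldl (pvStepA cap) [] with hod
  show od = (PySem.List.sorted st.keys (fun x => (st.getD x (0, 0)).1) true).map
    (fun k => (k, (st.getD k (0, 0)).2))
  have hsort : PySem.List.sorted st.keys (fun x => (st.getD x (0, 0)).1) true
      = od.map Prod.fst := by
    apply PySem.List.sorted_rev_eq_of_perm_of_pairwise_gt _ _ _ hperm
    exact (List.pairwise_map).mpr hpw
  rw [hsort, List.map_map]
  symm
  apply pvMap_self
  intro p hp
  have := hval p hp
  obtain ⟨p1, p2⟩ := p
  simp_all
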